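-- pv_equiv track=rewrite | github.com/shenperson/Linear_Algebra_HWs | hw3/b06901108/hw3_.py | set_mask
-- ===== SOURCE A (Python) =====
-- def set_mask(Min,Max,lb,ub):
--     mask=[]
--     for i in range(Min,Max):
--         if i>lb and i<ub:
--             mask.append(1)
--         else:
--             mask.append(0)
--     return mask
-- ===== SOURCE B (Python) =====
-- def set_mask(Min, Max, lb, ub):
--     # B: closed-form block construction instead of an elementwise scan.
--     if Max <= Min:
--         return []
--     lo = max(Min, lb + 1)
--     hi = min(Max, ub)
--     if hi <= lo:
--         return [0] * (Max - Min)
--     return [0] * (lo - Min) + [1] * (hi - lo) + [0] * (Max - hi)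
-- ===== Notes on version B (the rewrite author's own statement) =====
-- stated objective: faster
-- what changed: Replaces the per-integer scan with a closed-form computation of the single contiguous run of 1s and builds the list from three replicated blocks.
import Mathlib
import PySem

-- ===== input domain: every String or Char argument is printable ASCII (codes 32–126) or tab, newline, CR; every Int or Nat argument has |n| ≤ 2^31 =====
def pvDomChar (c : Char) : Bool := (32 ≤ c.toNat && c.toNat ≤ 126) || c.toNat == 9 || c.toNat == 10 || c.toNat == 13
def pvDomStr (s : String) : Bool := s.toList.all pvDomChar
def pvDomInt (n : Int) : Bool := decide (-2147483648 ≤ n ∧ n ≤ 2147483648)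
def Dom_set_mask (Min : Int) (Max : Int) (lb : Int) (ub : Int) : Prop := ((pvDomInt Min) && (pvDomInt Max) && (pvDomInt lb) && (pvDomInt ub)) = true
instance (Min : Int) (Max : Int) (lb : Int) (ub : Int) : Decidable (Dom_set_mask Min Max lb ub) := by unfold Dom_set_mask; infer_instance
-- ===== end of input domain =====

-- B builds the mask as three replicated blocks around the single run of 1s instead of scanning each integer (constant-factor faster construction).

-- ===== PORT A =====
def set_mask (Min : Int) (Max : Int) (lb : Int) (ub : Int) : List Int :=
  (PySem.List.pyRange Min Max 1).foldl
    (fun mask i => if lb < i ∧ i < ub then mask ++ [(1 : Int)] else mask ++ [(0 : Int)]) []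

-- ===== PORT B =====
def set_mask_alt (Min : Int) (Max : Int) (lb : Int) (ub : Int) : List Int :=
  if Max ≤ Min then []
  else
    let lo := max Min (lb + 1)
    let hi := min Max ub
    if hi ≤ lo then List.replicate (Max - Min).toNat 0
    else
      List.replicate (lo - Min).toNat 0 ++ List.replicate (hi - lo).toNat 1 ++
        List.replicate (Max - hi).toNat 0

-- ===== PRECONDITION & SPEC =====
def Spec_set_mask (Min : Int) (Max : Int) (lb : Int) (ub : Int) (out : List Int) : Prop := out = set_mask_alt Min Max lb ub
instance (Min : Int) (Max : Int) (lb : Int) (ub : Int) (out : List Int) : Decidable (Spec_set_mask Min Max lb ub out) := by unfold Spec_set_mask; infer_instance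

-- ===== CLAIM (what is proved, stated in full; the proofs are below) =====
def Claim_equal_set_mask : Prop := ∀ (Min : Int) (Max : Int) (lb : Int) (ub : Int), Dom_set_mask Min Max lb ub → Spec_set_mask Min Max lb ub (set_mask Min Max lb ub)

-- ===== LEMMAS AND PROOFS =====

theorem set_mask_eq_map (Min Max lb ub : Int) :
    set_mask Min Max lb ub =
      (PySem.List.pyRange Min Max 1).map (fun i => if lb < i ∧ i < ub then (1 : Int) else 0) := by
  unfold set_mask
  have hfun : (fun (mask : List Int) (i : Int) =>
      if lb < i ∧ i < ub then mask ++ [(1 : Int)] else mask ++ [(0 : Int)]) =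
      (fun mask i => mask ++ [if lb < i ∧ i < ub then (1 : Int) else 0]) := by
    funext mask i; split_ifs <;> rfl
  rw [hfun, PySem.List.foldl_append_singleton_eq_map, List.nil_append]

theorem map_mask_const_zero (a b lb ub : Int)
    (h : ∀ i : Int, a ≤ i → i < b → ¬(lb < i ∧ i < ub)) :
    (PySem.List.pyRange a b 1).map (fun i => if lb < i ∧ i < ub then (1 : Int) else 0) =
      List.replicate (b - a).toNat 0 := by
  rw [List.eq_replicate_iff]
  constructor
  · simp [PySem.List.length_pyRange_one]
  · intro x hx
    rcases List.mem_map.mp hx with ⟨i, hi, rfl⟩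
    rcases (PySem.List.mem_pyRange_one).mp hi with ⟨h1, h2⟩
    simp [h i h1 h2]

theorem map_mask_const_one (a b lb ub : Int)
    (h : ∀ i : Int, a ≤ i → i < b → lb < i ∧ i < ub) :
    (PySem.List.pyRange a b 1).map (fun i => if lb < i ∧ i < ub then (1 : Int) else 0) =
      List.replicate (b - a).toNat 1 := by
  rw [List.eq_replicate_iff]
  constructor
  · simp [PySem.List.length_pyRange_one]
  · intro x hx
    rcases List.mem_map.mp hx with ⟨i, hi, rfl⟩
    rcases (PySem.List.mem_pyRange_one).mp hi with ⟨h1, h2⟩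
    simp [h i h1 h2]

-- ===== VERDICT (by name: the statement is the Claim_ definition above) =====
theorem set_mask_spec : Claim_equal_set_mask := by
  intro Min Max lb ub _
  unfold Spec_set_mask set_mask_alt
  rw [set_mask_eq_map]
  by_cases hMM : Max ≤ Min
  · simp [hMM, PySem.List.pyRange_one_eq_nil hMM]
  · simp only [hMM, if_false]
    set lo := max Min (lb + 1) with hlo
    set hi := min Max ub with hhi
    by_cases hempty : hi ≤ lo
    · simp only [hempty, if_true]
      exact map_mask_const_zero Min Max lb ub (by intro i h1 h2; omega)
    · simp only [hempty, if_false]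
      have hMlo : Min ≤ lo := le_max_left _ _
      have hloMax : lo ≤ Max := by omega
      have hhiMax : hi ≤ Max := min_le_left _ _
      have hlohi : lo ≤ hi := by omega
      rw [PySem.List.pyRange_one_append Min lo Max hMlo hloMax,
        PySem.List.pyRange_one_append lo hi Max hlohi hhiMax,
        List.map_append, List.map_append,
        map_mask_const_zero Min lo lb ub (by intro i h1 h2; omega),
        map_mask_const_one lo hi lb ub (by intro i h1 h2; omega),
        map_mask_const_zero hi Max lb ub (by intro i h1 h2; omega),
        List.append_assoc]
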